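-- pv_equiv track=rewrite | github.com/mdajijulhakimquanta/BdAIO | preliminary/K_Build_The_Stairs.py | solve
-- ===== SOURCE A (Python) =====
-- def solve(n, a):
--     h = max(a[i] - i for i in range(n))
--
--     counter = 0
--     for i in range(n):
--         height = h + i
--         if height > a[i]:
--             counter += height - a[i]
--     return counter
-- ===== SOURCE B (Python) =====
-- def solve(n, a):
--     h = max(a[i] - i for i in range(n))
--     return n * h + n * (n - 1) // 2 - sum(a[:n])
-- ===== Notes on version B (the rewrite author's own statement) =====
-- stated objective: simpler
-- what changed: The second accumulation loop with its conditional is replaced by the closed form n*h + n*(n-1)//2 - sum(a[:n]), valid because h is the maximum of a[i]-i so every guarded term h+i-a[i] is nonnegative.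
import Mathlib
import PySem

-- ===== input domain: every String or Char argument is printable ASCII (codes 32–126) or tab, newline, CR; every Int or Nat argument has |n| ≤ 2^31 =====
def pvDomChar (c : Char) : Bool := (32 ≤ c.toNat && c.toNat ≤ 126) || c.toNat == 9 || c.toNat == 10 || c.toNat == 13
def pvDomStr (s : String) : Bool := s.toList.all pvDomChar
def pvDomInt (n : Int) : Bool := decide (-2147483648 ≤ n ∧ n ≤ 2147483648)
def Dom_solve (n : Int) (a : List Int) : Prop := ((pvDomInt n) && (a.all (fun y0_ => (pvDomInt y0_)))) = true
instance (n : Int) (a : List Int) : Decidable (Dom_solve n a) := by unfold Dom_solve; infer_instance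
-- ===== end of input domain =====

-- B replaces A's second (conditional-accumulation) loop by the closed form
-- n*h + n*(n-1)//2 - sum(a[:n]) ("simpler"); the maximum h is computed as in A.

-- ===== PORT A =====
def solve (n : Int) (a : List Int) : Int :=
  let vals := (PySem.List.pyRange 0 n 1).map (fun i => PySem.List.pyGetD a i 0 - i)
  let h := (PySem.List.max? vals (fun x => x)).getD 0
  (PySem.List.pyRange 0 n 1).foldl
    (fun counter i =>
      let height := h + i
      if height > PySem.List.pyGetD a i 0 then counter + (height - PySem.List.pyGetD a i 0)
      else counter) 0

-- ===== PORT B =====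
def solve_alt (n : Int) (a : List Int) : Int :=
  let vals := (PySem.List.pyRange 0 n 1).map (fun i => PySem.List.pyGetD a i 0 - i)
  let h := (PySem.List.max? vals (fun x => x)).getD 0
  n * h + PySem.Int.floordiv (n * (n - 1)) 2 - (PySem.List.slice a none (some n)).sum

-- ===== PRECONDITION & SPEC =====
-- Pre: Python A raises ValueError (empty max) when n ≤ 0 and IndexError when n > len(a); B raises there too.
def Pre_solve (n : Int) (a : List Int) : Prop := 1 ≤ n ∧ n ≤ (a.length : Int)
instance (n : Int) (a : List Int) : Decidable (Pre_solve n a) := by unfold Pre_solve; infer_instance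
def pvWitness_solve : Int × List Int := (3, [3, 1, 4])
def Spec_solve (n : Int) (a : List Int) (out : Int) : Prop := out = solve_alt n a
instance (n : Int) (a : List Int) (out : Int) : Decidable (Spec_solve n a out) := by unfold Spec_solve; infer_instance

-- ===== CLAIM (what is proved, stated in full; the proofs are below) =====
def Claim_equal_solve : Prop := ∀ (n : Int) (a : List Int), Dom_solve n a → Pre_solve n a → Spec_solve n a (solve n a)

-- ===== LEMMAS AND PROOFS =====

-- Gauss sum of indices, as a doubled identity (no division inside the induction)
lemma two_mul_sum_range (m : Nat) :
    2 * ((List.range m).map (fun i : Nat => (i : Int))).sum = (m : Int) * ((m : Int) - 1) := by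
  induction m with
  | zero => simp
  | succ k ih =>
    rw [List.range_succ, List.map_append, List.sum_append]
    simp only [List.map_cons, List.map_nil, List.sum_cons, List.sum_nil]
    push_cast
    push_cast at ih
    ring_nf
    ring_nf at ih
    omega

lemma sum_range_getD (a : List Int) (m : Nat) (hm : m ≤ a.length) :
    ((List.range m).map (fun i => a.getD i 0)).sum = (a.take m).sum := by
  induction m with
  | zero => simp
  | succ k ih =>
    have hk : k < a.length := by omega
    rw [List.range_succ, List.map_append, List.sum_append,
        ih (by omega), List.sum_take_succ a k hk]
    simp [List.getD_eq_getElem?_getD, List.getElem?_eq_getElem hk]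

-- linearity: the unconditional loop body splits into three sums
lemma sum_split (a : List Int) (h : Int) (m : Nat) :
    ((List.range m).map (fun i : Nat => h + (i : Int) - a.getD i 0)).sum
      = (m : Int) * h + ((List.range m).map (fun i : Nat => (i : Int))).sum
        - ((List.range m).map (fun i => a.getD i 0)).sum := by
  induction m with
  | zero => simp
  | succ k ih =>
    rw [List.range_succ]
    simp only [List.map_append, List.sum_append, List.map_cons, List.map_nil,
      List.sum_cons, List.sum_nil]
    rw [ih]
    push_cast
    ring

theorem solve_spec : Claim_equal_solve := by
  intro n a _ hpre
  obtain ⟨h1, h2⟩ := hpre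
  unfold Spec_solve solve solve_alt
  dsimp only
  obtain ⟨m, rfl⟩ : ∃ m : Nat, n = (m : Int) := ⟨n.toNat, (Int.toNat_of_nonneg (by omega)).symm⟩
  have hmlen : m ≤ a.length := by exact_mod_cast h2
  set vals := (PySem.List.pyRange 0 (m : Int) 1).map (fun i => PySem.List.pyGetD a i 0 - i) with hvals
  set h := (PySem.List.max? vals (fun x => x)).getD 0 with hh
  -- h bounds every a[i] - i for i in the range
  have hmax : ∀ i ∈ PySem.List.pyRange 0 (m : Int) 1, PySem.List.pyGetD a i 0 - i ≤ h := by
    intro i hi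
    have hne : vals ≠ [] := by
      simp only [hvals, ne_eq, List.map_eq_nil_iff]
      intro hcon
      rw [hcon] at hi
      exact (List.not_mem_nil) hi
    obtain ⟨v, hv⟩ := Option.ne_none_iff_exists'.1
      (mt (PySem.List.max?_eq_none_iff vals (fun x => x)).mp hne)
    have hle := PySem.List.max?_isMax hv (PySem.List.pyGetD a i 0 - i)
      (List.mem_map.2 ⟨i, hi, rfl⟩)
    simpa [hh, hv] using hle
  -- the guarded accumulation equals the unconditional one (each guarded term is ≥ 0)
  have hstep : (PySem.List.pyRange 0 (m : Int) 1).foldl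
      (fun counter i =>
        if h + i > PySem.List.pyGetD a i 0 then counter + (h + i - PySem.List.pyGetD a i 0)
        else counter) 0
      = (PySem.List.pyRange 0 (m : Int) 1).foldl
      (fun counter i => counter + (h + i - PySem.List.pyGetD a i 0)) 0 := by
    apply PySem.List.foldl_congr_mem
    intro acc i hi
    have := hmax i hi
    by_cases hc : h + i > PySem.List.pyGetD a i 0
    · simp [hc]
    · simp only [hc, ite_eq_left_iff]
      intro _; omega
  rw [hstep, PySem.List.foldl_add, zero_add,
      PySem.List.pyRange_zero_natCast, PySem.List.slice_to_natCast, List.map_map]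
  have hbody : ((List.range m).map
        ((fun i => h + i - PySem.List.pyGetD a i 0) ∘ (fun k : Nat => (k : Int))))
      = (List.range m).map (fun i : Nat => h + (i : Int) - a.getD i 0) := by
    apply List.map_congr_left
    intro i _
    simp [Function.comp, PySem.List.pyGetD_natCast]
  rw [hbody, sum_split, sum_range_getD a m hmlen]
  have hgauss : PySem.Int.floordiv ((m : Int) * ((m : Int) - 1)) 2
      = ((List.range m).map (fun i : Nat => (i : Int))).sum := by
    rw [← two_mul_sum_range, PySem.Int.floordiv_eq_ediv_of_pos (by norm_num)]
    omega
  rw [hgauss]
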